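-- pv_equiv track=rewrite | github.com/elastic/competitive-benchmarking-studies | jingra/src/benchmark/comparison/compare.py | extract_at_value
-- ===== SOURCE A (Python) =====
-- from typing import Optional
--
-- def extract_at_value(filename: str) -> Optional[str]:
--     at = filename.find("@")
--     if at == -1:
--         return None
--     i = at + 1
--     j = i
--     while j < len(filename) and filename[j].isdigit():
--         j += 1
--     return filename[i:j] or None
-- ===== SOURCE B (Python) =====
-- import re
-- from typing import Optional
--
-- _AT_DIGITS = re.compile(r'[^@]*@(\d+)')
--
-- def extract_at_value(filename: str) -> Optional[str]:
--     m = _AT_DIGITS.match(filename)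
--     return m.group(1) if m else None
-- ===== Notes on version B (the rewrite author's own statement) =====
-- stated objective: idiomatic
-- what changed: Replaces the manual find-plus-while-index scan with a single anchored regular expression [^@]*@(\d+): the starred segment pins the match to the first at-sign and the group demands at least one digit, so the whole extraction is one declarative pattern match instead of index arithmetic.
import Mathlib
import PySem

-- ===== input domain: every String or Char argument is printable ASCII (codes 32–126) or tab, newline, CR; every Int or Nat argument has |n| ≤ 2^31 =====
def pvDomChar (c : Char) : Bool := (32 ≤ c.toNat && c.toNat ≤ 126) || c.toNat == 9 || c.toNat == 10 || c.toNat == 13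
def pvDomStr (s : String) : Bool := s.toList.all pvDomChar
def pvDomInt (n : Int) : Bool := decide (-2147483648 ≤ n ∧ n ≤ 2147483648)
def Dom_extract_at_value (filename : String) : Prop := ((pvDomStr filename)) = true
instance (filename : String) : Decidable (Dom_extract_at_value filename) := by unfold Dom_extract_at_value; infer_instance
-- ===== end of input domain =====

-- B replaces A's find + index while-loop by a single anchored regular expression
-- match [^@]*@(\d+) (idiomatic, declarative); return value only, no side effects.


-- ===== PORT A =====
-- the while loop 'while j < len(filename) and filename[j].isdigit(): j += 1';
-- fuel bounds the iteration count (the loop runs at most s.length steps)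
def pvWhileA (s : List Char) (fuel : Nat) (j : Nat) : Nat :=
  match fuel with
  | 0 => j
  | f + 1 =>
    if j < s.length ∧ PySem.Chars.isdigit (s.getD j ' ') then pvWhileA s f (j + 1) else j

def extract_at_value (filename : String) : Option String :=
  let s := filename.toList
  let at_ := PySem.Chars.find s "@".toList
  if at_ == -1 then none
  else
    let i := at_ + 1
    let j := pvWhileA s s.length i.toNat
    let sub := PySem.Chars.slice s (some i) (some (j : Int))
    if sub.isEmpty then none else some (String.ofList sub)

-- ===== PORT B =====
-- hand port of the library call re.match(r'[^@]*@(\d+)', filename); it is EXACT for this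
-- pattern: [^@] cannot match '@', so the greedy [^@]* segment is forced to stop exactly at
-- the FIRST '@' (no other backtracking alternative can satisfy the mandatory '@'), and the
-- group (\d+) is the greedy run of ASCII digits after it, failing if it is empty.

-- '@(\d+)' at the current position: the greedy digit run, at least one digit required
def pvReDigits? (s : List Char) : Option (List Char) :=
  let d := s.takeWhile PySem.Chars.isdigit
  if d.isEmpty then none else some d

-- '[^@]*@(\d+)' anchored at the head of s
def pvReMatch (s : List Char) : Option (List Char) :=
  match s with
  | [] => none
  | c :: rest => if c = '@' then pvReDigits? rest else pvReMatch rest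

def extract_at_value_alt (filename : String) : Option String :=
  (pvReMatch filename.toList).map String.ofList

-- ===== PRECONDITION & SPEC =====
def Spec_extract_at_value (filename : String) (out : Option String) : Prop := out = extract_at_value_alt filename
instance (filename : String) (out : Option String) : Decidable (Spec_extract_at_value filename out) := by unfold Spec_extract_at_value; infer_instance

-- ===== CLAIM (what is proved, stated in full; the proofs are below) =====
def Claim_equal_extract_at_value : Prop := ∀ (filename : String), Dom_extract_at_value filename → Spec_extract_at_value filename (extract_at_value filename)

-- ===== LEMMAS AND PROOFS =====

-- the regex matcher fails when there is no '@'
lemma pvReMatch_no_at (s : List Char) (h : '@' ∉ s) : pvReMatch s = none := by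
  induction s with
  | nil => rfl
  | cons c t ih =>
    have hc : c ≠ '@' := fun hc => h (hc ▸ List.mem_cons_self)
    rw [pvReMatch, if_neg hc]
    exact ih (fun hm => h (List.mem_cons_of_mem _ hm))

-- the regex matcher past a '@'-free prefix reads the group at the first '@'
lemma pvReMatch_prefix (t r : List Char) (ht : '@' ∉ t) :
    pvReMatch (t ++ '@' :: r) = pvReDigits? r := by
  induction t with
  | nil => simp [pvReMatch]
  | cons c t ih =>
    have hc : c ≠ '@' := fun h => ht (h ▸ List.mem_cons_self)
    rw [List.cons_append, pvReMatch, if_neg hc]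
    exact ih (fun h => ht (List.mem_cons_of_mem _ h))

-- the while loop computes i + length of the leading digit run of s.drop i
lemma pvWhileA_spec (s : List Char) : ∀ (fuel j : Nat), s.length - j ≤ fuel →
    pvWhileA s fuel j = j + ((s.drop j).takeWhile PySem.Chars.isdigit).length := by
  intro fuel
  induction fuel with
  | zero =>
    intro j hj
    have : s.length ≤ j := by omega
    simp [pvWhileA, List.drop_eq_nil_of_le this]
  | succ f ih =>
    intro j hj
    by_cases hlt : j < s.length
    · have hdrop : s.drop j = s[j] :: s.drop (j + 1) := List.drop_eq_getElem_cons hlt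
      have hget : s.getD j ' ' = s[j] := List.getD_eq_getElem s ' ' hlt
      by_cases hd : PySem.Chars.isdigit s[j]
      · rw [pvWhileA, if_pos ⟨hlt, hget ▸ hd⟩, ih (j + 1) (by omega), hdrop,
          List.takeWhile_cons_of_pos hd]
        simp; omega
      · rw [pvWhileA, if_neg (by rw [hget]; tauto), hdrop,
          List.takeWhile_cons_of_neg (by simpa using hd)]
        simp
    · have hle : s.length ≤ j := by omega
      rw [pvWhileA, if_neg (by tauto)]
      simp [List.drop_eq_nil_of_le hle]

-- ===== VERDICT (by name: the statement is the Claim_ definition above) =====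
theorem extract_at_value_spec : Claim_equal_extract_at_value := by
  intro filename _
  unfold Spec_extract_at_value extract_at_value extract_at_value_alt
  set s := filename.toList with hs
  dsimp only
  by_cases hin : '@' ∈ s
  · -- '@' occurs: find points at the first occurrence
    have hinf : ['@'] <:+: s := (List.singleton_infix_iff '@' s).mpr hin
    have hfind : 0 ≤ PySem.Chars.find s "@".toList := by
      rw [show ("@".toList) = ['@'] from rfl, PySem.Chars.find_nonneg_iff]; exact hinf
    obtain ⟨hpre, hmin⟩ := PySem.Chars.find_spec hfind
    set k := (PySem.Chars.find s "@".toList).toNat with hk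
    rw [if_neg (by simp only [beq_iff_eq]; omega)]
    have hklt : k < s.length := by
      by_contra h
      have hnil : s.drop k = [] := List.drop_eq_nil_of_le (by omega)
      rw [show ("@".toList) = ['@'] from rfl, hnil] at hpre
      exact absurd (List.prefix_nil.mp hpre) (by simp)
    have hsk : s[k] = '@' := by
      have hp := hpre
      rw [show ("@".toList) = ['@'] from rfl, List.drop_eq_getElem_cons hklt] at hp
      obtain ⟨t, ht⟩ := hp
      exact (List.cons.injEq _ _ _ _ ▸ ht).1.symm
    have hnot : '@' ∉ s.take k := by
      intro hmem
      obtain ⟨i, hi, hgi⟩ := List.mem_iff_getElem.mp hmem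
      have hilt : i < k := by simp [List.length_take] at hi; omega
      apply hmin i hilt
      rw [show ("@".toList) = ['@'] from rfl,
        List.drop_eq_getElem_cons (show i < s.length by omega)]
      simp only [List.getElem_take] at hgi
      exact ⟨s.drop (i + 1), by rw [List.singleton_append, hgi]⟩
    have hsplit : s = s.take k ++ '@' :: s.drop (k + 1) := by
      conv_lhs => rw [← List.take_append_drop k s]
      rw [List.drop_eq_getElem_cons hklt, hsk]
    -- B side: the matcher reads the digit group right after the first '@'
    rw [show pvReMatch s = pvReDigits? (s.drop (k + 1)) by
      conv_lhs => rw [hsplit]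
      exact pvReMatch_prefix _ _ hnot]
    -- A side: while-loop and slice
    have hfa : PySem.Chars.find s "@".toList = (k : Int) := by omega
    rw [hfa, pvWhileA_spec s s.length ((k : Int) + 1).toNat (by omega)]
    have htn : ((k : Int) + 1).toNat = k + 1 := by omega
    rw [htn]
    set r := s.drop (k + 1) with hr
    set d := (r.takeWhile PySem.Chars.isdigit).length with hd
    have hslice : PySem.Chars.slice s (some ((k : Int) + 1)) (some ((k + 1 + d : Nat) : Int))
        = r.takeWhile PySem.Chars.isdigit := by
      rw [PySem.Chars.slice_eq_listSlice,
        show ((k : Int) + 1) = ((k + 1 : Nat) : Int) by push_cast; ring,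
        PySem.List.slice_toNat _ (by positivity) (by positivity)]
      have h2 : ((k + 1 + d : Nat) : Int).toNat - ((k + 1 : Nat) : Int).toNat = d := by omega
      rw [h2, Int.toNat_natCast, ← hr, hd]
      exact (List.prefix_iff_eq_take.mp (List.takeWhile_prefix _)).symm
    rw [hslice]
    -- both sides now speak about the leading digit run of r
    unfold pvReDigits?
    by_cases he : (r.takeWhile PySem.Chars.isdigit).isEmpty
    · rw [if_pos he, if_pos he]; rfl
    · rw [if_neg he, if_neg he]; rfl
  · -- no '@': A's find = -1, the matcher returns none
    have hfind : PySem.Chars.find s "@".toList = -1 := by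
      rw [show ("@".toList) = ['@'] from rfl, PySem.Chars.find_eq_neg_one_iff,
        List.singleton_infix_iff]
      exact hin
    rw [hfind, if_pos (by decide), pvReMatch_no_at s hin]
    rfl
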